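-- pv_equiv track=rewrite | github.com/tamlog06/Atcoder-Beginner-Contest | problems/ABC/290/c/abc290_c.py | solve
-- ===== SOURCE A (Python) =====
-- def solve(N, K, A):
--     ans = -1
--     A = sorted(list(set(A)))
--     for i in range(K):
--         if i >= len(A) or A[i] != i:
--             ans = i
--             break
--
--     if ans == -1:
--         return A[K-1] + 1
--     else:
--         return ans
-- ===== SOURCE B (Python) =====
-- def solve(N, K, A):
--     values = set(A)
--     if not values or min(values) != 0:
--         return 0
--     run = 0
--     while run < K and run in values:
--         run += 1
--     return run
-- ===== Notes on version B (the rewrite author's own statement) =====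
-- stated objective: alternative
-- what changed: A sorts the distinct values and scans positions 0..K-1 comparing index to value with a -1 sentinel and an A[K-1]+1 fallback; B never sorts: it builds a hash set once, returns 0 unless the minimum distinct value is 0, and otherwise walks the consecutive run upward while run < K and run is in the set. Pre_ restricts to the task's natural domain K >= 1: with K <= 0 A's scan is empty and it falls through to a negative-index A[K-1] lookup that is accidental or raises IndexError.
-- outside the precondition, e.g. on solve(1, 0, [5]): A returns 6, B returns 0; on solve(0, 0, []): A raises IndexError, B returns 0
import Mathlib
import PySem

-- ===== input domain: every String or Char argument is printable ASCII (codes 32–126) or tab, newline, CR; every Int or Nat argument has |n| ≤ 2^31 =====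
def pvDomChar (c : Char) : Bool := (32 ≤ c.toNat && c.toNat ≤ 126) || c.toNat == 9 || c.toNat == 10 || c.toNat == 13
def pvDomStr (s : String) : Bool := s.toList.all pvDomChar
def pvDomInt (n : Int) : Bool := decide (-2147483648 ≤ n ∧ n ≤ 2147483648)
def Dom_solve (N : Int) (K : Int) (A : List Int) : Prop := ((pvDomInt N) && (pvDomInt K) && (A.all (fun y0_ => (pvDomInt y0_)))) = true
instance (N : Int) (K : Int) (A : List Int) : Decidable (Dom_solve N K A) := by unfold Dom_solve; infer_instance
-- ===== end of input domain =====

-- B replaces A's sort-then-index-scan by a min check plus a hash-set run walk capped at K. Objective: alternative.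

-- ===== PORT A =====
-- the 'for i in range(K): if i >= len(A) or A[i] != i: ans = i; break' loop, as a recursion on the
-- loop index i (range(K) is lazy in Python; A[i] is only read under 0 <= i < len(A): pyGetD is exact here)
def solveLoopA (s : List Int) (K : Int) (i : Int) : Int :=
  if h : i < K then
    if (s.length : Int) ≤ i ∨ PySem.List.pyGetD s i 0 ≠ i then i else solveLoopA s K (i + 1)
  else -1
termination_by (K - i).toNat
decreasing_by omega

def solve (N : Int) (K : Int) (A : List Int) : Int :=
  let s := PySem.List.sorted (PySem.Set.ofList A) (fun x => x)
  let ans := solveLoopA s K 0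
  -- A[K-1]: in range exactly under Pre_solve (pyGetD's default is never returned inside Pre_solve)
  if ans = -1 then PySem.List.pyGetD s (K - 1) 0 + 1 else ans

-- ===== PORT B =====
-- 'while run < K and run in values: run += 1'
def runLoop (values : List Int) (K : Int) (run : Int) : Int :=
  if h : run < K ∧ run ∈ values then runLoop values K (run + 1) else run
termination_by (K - run).toNat
decreasing_by omega

def solve_alt (N : Int) (K : Int) (A : List Int) : Int :=
  let values := PySem.Set.ofList A
  if values = [] ∨ PySem.List.min? values (fun x => x) ≠ some 0 then 0
  else runLoop values K 0

-- ===== PRECONDITION & SPEC =====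
-- Pre_ restricts to the task's natural domain, K >= 1 (at least one element is chosen): with K <= 0
-- A's scan is empty and it falls through to A[K-1], a negative-index lookup that either raises
-- IndexError or returns an accidental 'max distinct + 1'.
def Pre_solve (N : Int) (K : Int) (A : List Int) : Prop := 1 ≤ K
instance (N : Int) (K : Int) (A : List Int) : Decidable (Pre_solve N K A) := by
  unfold Pre_solve; infer_instance

def pvWitness_solve : Int × Int × List Int := (3, 2, [0, 1, 5])

def Spec_solve (N : Int) (K : Int) (A : List Int) (out : Int) : Prop := out = solve_alt N K A
instance (N : Int) (K : Int) (A : List Int) (out : Int) : Decidable (Spec_solve N K A out) := by unfold Spec_solve; infer_instance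

-- ===== CLAIM (what is proved, stated in full; the proofs are below) =====
def Claim_equal_solve : Prop := ∀ (N : Int) (K : Int) (A : List Int), Dom_solve N K A → Pre_solve N K A → Spec_solve N K A (solve N K A)

-- ===== LEMMAS AND PROOFS =====

-- monotone indexing in a strictly increasing list
lemma getElem_mono_of_pairwise_lt {s : List Int} (hs : s.Pairwise (· < ·))
    {p q : Nat} (hpq : p ≤ q) (hq : q < s.length) : s[p]'(by omega) ≤ s[q] := by
  rcases Nat.lt_or_ge p q with h | h
  · exact le_of_lt ((List.pairwise_iff_getElem.mp hs) p q (by omega) hq h)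
  · have : p = q := by omega
    subst this; exact le_rfl

-- in a strictly increasing list of nonnegative integers containing 0,1,…,i, position k ≤ i holds value k
lemma sorted_prefix {s : List Int} (hs : s.Pairwise (· < ·)) (hnn : ∀ x ∈ s, 0 ≤ x) :
    ∀ (i : Nat), (∀ j : Nat, j ≤ i → ((j : Int) ∈ s)) →
    ∀ k : Nat, k ≤ i → ∃ h : k < s.length, s[k] = (k : Int) := by
  intro i
  induction i with
  | zero =>
    intro hmem k hk
    have hk0 : k = 0 := by omega
    subst hk0
    have h0 : (0 : Int) ∈ s := hmem 0 le_rfl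
    obtain ⟨p, hp, hsp⟩ := List.mem_iff_getElem.mp h0
    have hlen : 0 < s.length := by omega
    refine ⟨hlen, ?_⟩
    have h1 : s[0] ≤ s[p] := getElem_mono_of_pairwise_lt hs (Nat.zero_le p) hp
    have h2 : 0 ≤ s[0] := hnn _ (List.getElem_mem hlen)
    simp only [hsp] at h1
    omega
  | succ i ih =>
    intro hmem k hk
    rcases Nat.lt_or_ge k (i + 1) with hki | hki
    · exact ih (fun j hj => hmem j (by omega)) k (by omega)
    · have hk1 : k = i + 1 := by omega
      subst hk1
      obtain ⟨hi, hsi⟩ := ih (fun j hj => hmem j (by omega)) i le_rfl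
      have hmem1 : ((i + 1 : Nat) : Int) ∈ s := hmem (i + 1) le_rfl
      obtain ⟨p, hp, hsp⟩ := List.mem_iff_getElem.mp hmem1
      have hpi : i < p := by
        by_contra hle
        have : s[p]'hp ≤ s[i] := getElem_mono_of_pairwise_lt hs (by omega) hi
        rw [hsp, hsi] at this
        push_cast at this
        omega
      have hlen : i + 1 < s.length := by omega
      refine ⟨hlen, ?_⟩
      have h1 : s[i + 1] ≤ s[p] := getElem_mono_of_pairwise_lt hs (by omega) hp
      have h2 : s[i] < s[i + 1] := (List.pairwise_iff_getElem.mp hs) i (i + 1) (by omega) hlen (by omega)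
      rw [hsp] at h1
      rw [hsi] at h2
      push_cast at h1 h2 ⊢
      omega

-- a value absent from s triggers A's break condition at index i
lemma break_of_not_mem {s : List Int} (i : Nat) (hni : ((i : Nat) : Int) ∉ s) :
    (s.length : Int) ≤ (i : Int) ∨ PySem.List.pyGetD s (i : Int) 0 ≠ (i : Int) := by
  rcases Nat.lt_or_ge i s.length with h | h
  · right
    intro heq
    rw [PySem.List.pyGetD_natCast, List.getD_eq_getElem s 0 h] at heq
    exact hni (heq ▸ List.getElem_mem h)
  · left; exact_mod_cast h

-- when the sorted distinct list starts with a value ≠ 0 (and K ≥ 1), A's scan breaks at index 0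
lemma solve_eq_zero_of_head_ne (N K : Int) (A : List Int) (hK : 1 ≤ K)
    {m : Int} {tl : List Int}
    (hcons : PySem.List.sorted (PySem.Set.ofList A) (fun x => x) = m :: tl)
    (hm : m ≠ 0) : solve N K A = 0 := by
  simp only [solve]
  rw [solveLoopA, dif_pos (show (0:Int) < K by omega)]
  have hcond : ((PySem.List.sorted (PySem.Set.ofList A) (fun x => x)).length : Int) ≤ 0 ∨
      PySem.List.pyGetD (PySem.List.sorted (PySem.Set.ofList A) (fun x => x)) 0 0 ≠ 0 := by
    right
    rw [hcons]
    simpa [PySem.List.pyGetD, PySem.List.pyGet?, PySem.List.pyIdx?] using hm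
  rw [if_pos hcond]
  norm_num

-- the core correspondence on nonnegative inputs: A's indexed scan from i = t followed by the
-- A[K-1]+1 fallback computes exactly B's run walk started at t
lemma main_loop (A : List Int) (hnn : ∀ a ∈ A, 0 ≤ a) (K : Int) (hK : 1 ≤ K) :
    ∀ (n : Nat) (t : Nat), K.toNat - t = n → (t : Int) ≤ K →
    (∀ j : Nat, j < t → ((j : Int) ∈ A)) →
    (let s := PySem.List.sorted (PySem.Set.ofList A) (fun x => x)
     let ans := solveLoopA s K (t : Int)
     if ans = -1 then PySem.List.pyGetD s (K - 1) 0 + 1 else ans)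
      = runLoop (PySem.Set.ofList A) K (t : Int) := by
  have hs : (PySem.List.sorted (PySem.Set.ofList A) (fun x => x)).Pairwise (· < ·) :=
    PySem.List.sorted_ofList_pairwise_lt A
  set s := PySem.List.sorted (PySem.Set.ofList A) (fun x => x) with hsdef
  have hmemA : ∀ x : Int, x ∈ s ↔ x ∈ A := by
    intro x
    rw [hsdef, PySem.List.mem_sorted, PySem.Set.mem_ofList]
  have hnns : ∀ x ∈ s, 0 ≤ x := fun x hx => hnn x ((hmemA x).mp hx)
  intro n
  induction n with
  | zero =>
    intro t ht htK hpre
    simp only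
    rw [solveLoopA, dif_neg (by omega)]
    rw [if_pos (rfl : (-1 : Int) = -1)]
    rw [runLoop]
    rw [dif_neg (by
      intro hcontra
      omega)]
    have hk1 : K - 1 = (((K - 1).toNat : Nat) : Int) := by omega
    obtain ⟨hlt, hval⟩ := sorted_prefix hs hnns (K - 1).toNat
      (fun j hj => (hmemA _).mpr (hpre j (by omega))) (K - 1).toNat le_rfl
    rw [hk1, PySem.List.pyGetD_natCast, List.getD_eq_getElem s 0 hlt, hval]
    omega
  | succ m ih =>
    intro t ht htK hpre
    have htltK : (t : Int) < K := by omega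
    simp only
    rw [solveLoopA, dif_pos htltK]
    by_cases hmem : ((t : Nat) : Int) ∈ A
    · -- t is present: no break at t on A's side, step on B's side
      obtain ⟨hlt, hval⟩ := sorted_prefix hs hnns t
        (fun j hj => (hmemA _).mpr (by rcases Nat.lt_or_ge j t with h | h
                                       · exact hpre j h
                                       · have : j = t := by omega
                                         subst this; exact hmem)) t le_rfl
      have hcond : ¬ ((s.length : Int) ≤ (t : Int) ∨ PySem.List.pyGetD s (t : Int) 0 ≠ (t : Int)) := by
        push_neg
        constructor
        · exact_mod_cast hlt
        · rw [PySem.List.pyGetD_natCast, List.getD_eq_getElem s 0 hlt, hval]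
      rw [if_neg hcond]
      rw [runLoop, dif_pos ⟨htltK, (PySem.Set.mem_ofList A _).mpr hmem⟩]
      have hcast : (t : Int) + 1 = ((t + 1 : Nat) : Int) := by push_cast; ring
      rw [hcast]
      exact ih (t + 1) (by omega) (by omega)
        (fun j hj => by rcases Nat.lt_or_ge j t with h | h
                        · exact hpre j h
                        · have : j = t := by omega
                          subst this; exact hmem)
    · -- t is absent: A breaks at t, B's walk stops at t
      have hcond := break_of_not_mem (s := s) t (fun h => hmem ((hmemA _).mp h))
      rw [if_pos hcond]
      have htne : ((t : Nat) : Int) ≠ -1 := by omega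
      rw [if_neg htne]
      rw [runLoop, dif_neg (by
        intro hcontra
        exact hmem ((PySem.Set.mem_ofList A _).mp hcontra.2))]

-- ===== VERDICT (by name: the statement is the Claim_ definition above) =====
theorem solve_spec : Claim_equal_solve := by
  intro N K A _hdom hK
  unfold Pre_solve at hK
  unfold Spec_solve solve_alt
  by_cases hnil : PySem.Set.ofList A = []
  · -- no values at all: A's scan breaks at i = 0 (0 ≥ len), B's min test fails
    rw [if_pos (Or.inl hnil)]
    have hAnil : A = [] := by
      cases hA : A with
      | nil => rfl
      | cons a tl =>
        exfalso
        have : a ∈ PySem.Set.ofList A := (PySem.Set.mem_ofList A a).mpr (by simp [hA])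
        simp [hnil] at this
    subst hAnil
    simp only [solve]
    rw [solveLoopA, dif_pos (show (0:Int) < K by omega)]
    rw [if_pos (show ((PySem.List.sorted (PySem.Set.ofList ([] : List Int)) (fun x => x)).length : Int) ≤ 0 ∨ _ by
      left; simp [PySem.List.sorted, PySem.Set.ofList])]
    norm_num
  · obtain ⟨m, hmin⟩ : ∃ m, PySem.List.min? (PySem.Set.ofList A) (fun x => x) = some m := by
      cases h : PySem.List.min? (PySem.Set.ofList A) (fun x => x) with
      | none => exact absurd ((PySem.List.min?_eq_none_iff _ _).mp h) hnil
      | some m => exact ⟨m, rfl⟩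
    by_cases hm0 : m = 0
    · -- minimum distinct value is 0: no negatives, and A's scan is B's run walk
      subst hm0
      rw [if_neg (by
        push_neg
        exact ⟨hnil, by rw [hmin]⟩)]
      have hnn : ∀ x ∈ A, 0 ≤ x := fun x hx =>
        PySem.List.min?_isMin hmin x ((PySem.Set.mem_ofList A x).mpr hx)
      have := main_loop A hnn K hK K.toNat 0 (by omega) (by omega) (by omega)
      unfold solve
      simpa using this
    · -- minimum distinct value ≠ 0: both sides return 0
      rw [if_pos (Or.inr (by rw [hmin]; simpa using hm0))]
      obtain ⟨h, tl, hcons⟩ := List.exists_cons_of_ne_nil (show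
        PySem.List.sorted (PySem.Set.ofList A) (fun x => x) ≠ [] by
          intro hc
          have : m ∈ PySem.List.sorted (PySem.Set.ofList A) (fun x => x) := by
            rw [PySem.List.mem_sorted]
            exact PySem.List.min?_mem hmin
          simp [hc] at this)
      have hmemh : h ∈ PySem.Set.ofList A := by
        rw [← PySem.List.mem_sorted (key := fun x => x), hcons]; simp
      have h1 : m ≤ h := PySem.List.min?_isMin hmin h hmemh
      have h2 : h ≤ m :=
        PySem.List.key_head_sorted_le (PySem.Set.ofList A) (fun x => x) hcons m
          (PySem.List.min?_mem hmin)
      exact solve_eq_zero_of_head_ne N K A hK hcons (by omega)
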